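-- pv_equiv track=rewrite | github.com/Fondamenti18/fondamenti-di-programmazione | students/AndreaSterbini/homework04/program01.py | estrai_sottoalbero
-- ===== SOURCE A (Python) =====
-- def estrai_sottoalbero(albero, x):
--     sottoalbero = {}
--     if x in albero:
--         figli = albero[x]
--         sottoalbero[x] = figli
--         for y in figli:
--             sottoalbero.update(estrai_sottoalbero(albero,y))
--     return sottoalbero
-- ===== SOURCE B (Python) =====
-- def estrai_sottoalbero(albero, x):
--     # fills one shared result dict during the traversal instead of
--     # building a fresh dict per call and merging with update()
--     sottoalbero = {}
--     def visita(nodo):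
--         if nodo in albero:
--             figli = albero[nodo]
--             sottoalbero[nodo] = figli
--             for y in figli:
--                 visita(y)
--     visita(x)
--     return sottoalbero
-- ===== Notes on version B (the rewrite author's own statement) =====
-- stated objective: alternative
-- what changed: B threads one shared accumulator dict through the traversal (visita mutates a single sottoalbero) instead of A's building a fresh dict in every recursive call and merging it into the parent with dict.update at each level.
import Mathlib
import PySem

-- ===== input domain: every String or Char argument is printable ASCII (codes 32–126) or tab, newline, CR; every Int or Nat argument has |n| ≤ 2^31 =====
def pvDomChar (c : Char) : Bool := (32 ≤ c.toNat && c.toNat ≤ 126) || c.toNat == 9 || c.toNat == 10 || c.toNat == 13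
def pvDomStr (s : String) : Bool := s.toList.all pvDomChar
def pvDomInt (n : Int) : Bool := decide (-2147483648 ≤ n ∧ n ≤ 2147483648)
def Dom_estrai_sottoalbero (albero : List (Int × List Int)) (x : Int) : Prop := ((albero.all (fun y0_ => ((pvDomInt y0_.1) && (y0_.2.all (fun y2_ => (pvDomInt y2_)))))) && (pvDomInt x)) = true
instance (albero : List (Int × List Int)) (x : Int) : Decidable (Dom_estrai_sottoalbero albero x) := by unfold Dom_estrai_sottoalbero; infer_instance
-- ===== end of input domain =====

-- B threads one shared accumulator dict through the recursion instead of building a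
-- fresh dict per call and merging it into the parent with update() at every level
-- (objective: alternative decomposition; return value proved identical).

-- ===== PORT A =====
-- Python A recurses on the children; on every input admitted by Pre_ (no key
-- reachable from x lies on a cycle) the recursion depth is at most the number of
-- keys, so fuel albero.length + 1 makes the port total without changing any
-- admitted result.
def estraiFuel : Nat → PySem.Dict Int (List Int) → Int → PySem.Dict Int (List Int)
  | 0, _, _ => PySem.Dict.empty
  | n + 1, albero, x =>
    match albero.get? x with                 -- 'if x in albero: figli = albero[x]'
    | some figli =>
        -- sottoalbero = {x: figli}; for y in figli: sottoalbero.update(estrai_sottoalbero(albero, y))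
        List.foldl (fun s y => s.update (estraiFuel n albero y).items)
          (PySem.Dict.insert PySem.Dict.empty x figli) figli
    | none => PySem.Dict.empty

def estrai_sottoalbero (albero : List (Int × List Int)) (x : Int) : List (Int × List Int) :=
  (estraiFuel (albero.length + 1) ⟨albero⟩ x).items

-- ===== PORT B =====
-- 'for y in figli: visita(y)' as an explicit recursion over the children list
def pvForEach (f : Int → PySem.Dict Int (List Int) → PySem.Dict Int (List Int)) :
    List Int → PySem.Dict Int (List Int) → PySem.Dict Int (List Int)
  | [], sotto => sotto
  | y :: ys, sotto => pvForEach f ys (f y sotto)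

-- visita(nodo), mutating the one shared dict 'sottoalbero'; same fuel bound as port A
def visitaFuel : Nat → PySem.Dict Int (List Int) → Int → PySem.Dict Int (List Int) → PySem.Dict Int (List Int)
  | 0, _, _, sotto => sotto
  | n + 1, albero, nodo, sotto =>
    match albero.get? nodo with
    | some figli => pvForEach (visitaFuel n albero) figli (sotto.insert nodo figli)
    | none => sotto

def estrai_sottoalbero_alt (albero : List (Int × List Int)) (x : Int) : List (Int × List Int) :=
  (visitaFuel (albero.length + 1) ⟨albero⟩ x PySem.Dict.empty).items

-- ===== PRECONDITION & SPEC =====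
def pvChildren (albero : List (Int × List Int)) (k : Int) : List Int :=
  ((PySem.Dict.mk albero).get? k).getD []

-- nodes reachable from the start set in at most n edge steps
def pvReach (albero : List (Int × List Int)) : Nat → List Int → List Int
  | 0, s => s
  | n + 1, s => s ++ pvReach albero n ((s.flatMap (pvChildren albero)).dedup)

-- Pre_ excludes exactly the inputs on which some key reachable from x lies on a
-- cycle: there Python A's recursion never bottoms out and raises RecursionError.
def Pre_estrai_sottoalbero (albero : List (Int × List Int)) (x : Int) : Prop :=
  ∀ k ∈ pvReach albero (albero.length + 1) [x],
    k ∉ pvReach albero (albero.length + 1) (pvChildren albero k)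
instance (albero : List (Int × List Int)) (x : Int) : Decidable (Pre_estrai_sottoalbero albero x) := by
  unfold Pre_estrai_sottoalbero; infer_instance

def pvWitness_estrai_sottoalbero : (List (Int × List Int)) × Int := ([(1, [2, 3]), (2, []), (3, [])], 1)

def Spec_estrai_sottoalbero (albero : List (Int × List Int)) (x : Int) (out : List (Int × List Int)) : Prop := out = estrai_sottoalbero_alt albero x
instance (albero : List (Int × List Int)) (x : Int) (out : List (Int × List Int)) : Decidable (Spec_estrai_sottoalbero albero x out) := by unfold Spec_estrai_sottoalbero; infer_instance

-- ===== CLAIM (what is proved, stated in full; the proofs are below) =====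
def Claim_equal_estrai_sottoalbero : Prop := ∀ (albero : List (Int × List Int)) (x : Int), Dom_estrai_sottoalbero albero x → Pre_estrai_sottoalbero albero x → Spec_estrai_sottoalbero albero x (estrai_sottoalbero albero x)

-- ===== LEMMAS AND PROOFS =====

-- two inserts at distinct keys commute when the first key is already present
theorem pv_insert_comm (d : PySem.Dict Int (List Int)) (k k₂ : Int) (v v₂ : List Int)
    (hk : d.contains k = true) (hne : k ≠ k₂) :
    (d.insert k₂ v₂).insert k v = (d.insert k v).insert k₂ v₂ := by
  apply PySem.Dict.ext
  have hk' : (d.insert k₂ v₂).contains k = true := by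
    rw [PySem.Dict.contains_insert]; simp [hk]
  by_cases h2 : d.contains k₂ = true
  · have h2' : (d.insert k v).contains k₂ = true := by
      rw [PySem.Dict.contains_insert]; simp [h2]
    rw [PySem.Dict.items_insert_of_contains _ v hk',
        PySem.Dict.items_insert_of_contains _ v₂ h2,
        PySem.Dict.items_insert_of_contains _ v₂ h2',
        PySem.Dict.items_insert_of_contains _ v hk]
    simp only [List.map_map]
    apply List.map_congr_left
    intro p _
    by_cases hp : p.1 = k₂
    · simp [Function.comp, hp, (Ne.symm hne)]
    · by_cases hq : p.1 = k
      · simp [Function.comp, hq, hne]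
      · simp [Function.comp, hp, hq]
  · have h2b : d.contains k₂ = false := by simpa using h2
    have h2' : (d.insert k v).contains k₂ = false := by
      rw [PySem.Dict.contains_insert]; simp [h2b, Ne.symm hne]
    rw [PySem.Dict.items_insert_of_contains _ v hk',
        PySem.Dict.items_insert_of_not_contains _ v₂ h2b,
        PySem.Dict.items_insert_of_not_contains _ v₂ h2',
        PySem.Dict.items_insert_of_contains _ v hk]
    simp [Ne.symm hne]

-- inserting a key that is present in d and absent from e commutes past update by e
theorem pv_update_insert_comm (e : List (Int × List Int)) :
    ∀ (d : PySem.Dict Int (List Int)) (k : Int) (v : List Int),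
      d.contains k = true → (∀ p ∈ e, p.1 ≠ k) →
      (d.update e).insert k v = (d.insert k v).update e := by
  induction e with
  | nil => intro d k v _ _; rfl
  | cons p e' ih =>
    intro d k v hk hfr
    have hne : k ≠ p.1 := (Ne.symm (hfr p (by simp)))
    show ((d.insert p.1 p.2).update e').insert k v = ((d.insert k v).insert p.1 p.2).update e'
    rw [ih (d.insert p.1 p.2) k v
          (by rw [PySem.Dict.contains_insert]; simp [hk])
          (fun q hq => hfr q (by simp [hq])),
        pv_insert_comm _ _ _ _ _ hk hne]

-- pushing an insert on a nodup dict out of an update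
theorem pv_upd_insert (l : List (Int × List Int)) :
    ∀ (a : PySem.Dict Int (List Int)) (k : Int) (v : List Int),
      (l.map Prod.fst).Nodup →
      a.update ((PySem.Dict.insert ⟨l⟩ k v).items) = (a.update l).insert k v := by
  induction l with
  | nil =>
    intro a k v _
    have h : (PySem.Dict.insert (⟨[]⟩ : PySem.Dict Int (List Int)) k v).items = [(k, v)] := by
      rw [PySem.Dict.items_insert_of_not_contains]
      · rfl
      · simp [PySem.Dict.contains]
    rw [h]; rfl
  | cons p l' ih =>
    intro a k v hnd
    obtain ⟨k', v'⟩ := p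
    rw [List.map_cons, List.nodup_cons] at hnd
    obtain ⟨hk'l', hnd'⟩ := hnd
    simp only at hk'l'
    by_cases hkk : k = k'
    · subst hkk
      have hc : (PySem.Dict.mk ((k, v') :: l')).contains k = true := by
        simp [PySem.Dict.contains]
      have hmapid : List.map (fun p : Int × List Int => if (p.1 == k) = true then (k, v) else p) l' = l' := by
        have := List.map_congr_left (l := l')
          (f := fun p : Int × List Int => if (p.1 == k) = true then (k, v) else p) (g := id)
          (fun p hp => by
            have : p.1 ≠ k := fun h => hk'l' (h ▸ List.mem_map_of_mem hp)
            simp [this])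
        simpa using this
      have hitems : (PySem.Dict.insert ⟨(k, v') :: l'⟩ k v).items = (k, v) :: l' := by
        rw [PySem.Dict.items_insert_of_contains _ v hc]
        simp only [List.map_cons, beq_self_eq_true, if_pos]
        rw [hmapid]
      rw [hitems]
      show (a.insert k v).update l' = ((a.insert k v').update l').insert k v
      rw [pv_update_insert_comm l' (a.insert k v') k v (PySem.Dict.contains_insert_self _ _ _)
            (fun q hq h => hk'l' (h ▸ List.mem_map_of_mem hq)),
          PySem.Dict.insert_insert_self]
    · have hitems : (PySem.Dict.insert ⟨(k', v') :: l'⟩ k v).items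
          = (k', v') :: (PySem.Dict.insert ⟨l'⟩ k v).items := by
        have e1 : (PySem.Dict.mk ((k', v') :: l')).contains k = ((k' == k) || l'.any (fun p => p.1 == k)) := by
          show (((k', v') :: l').any (fun p => p.1 == k)) = _
          rw [List.any_cons]
        have e0 : (PySem.Dict.mk l').contains k = l'.any (fun p => p.1 == k) := rfl
        have ekk : (k' == k) = false := by simp [Ne.symm hkk]
        cases hc : l'.any (fun p => p.1 == k) with
        | true =>
          rw [PySem.Dict.items_insert_of_contains _ v (by rw [e1, ekk, hc]; rfl),
              PySem.Dict.items_insert_of_contains _ v (by rw [e0, hc])]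
          simp [Ne.symm hkk]
        | false =>
          rw [PySem.Dict.items_insert_of_not_contains _ v (by rw [e1, ekk, hc]; rfl),
              PySem.Dict.items_insert_of_not_contains _ v (by rw [e0, hc])]
          rfl
      rw [hitems]
      show (a.insert k' v').update (PySem.Dict.insert ⟨l'⟩ k v).items
          = ((a.insert k' v').update l').insert k v
      exact ih (a.insert k' v') k v hnd'

-- associativity of update through a nodup middle dict
theorem pv_update_assoc (e : List (Int × List Int)) :
    ∀ (a s : PySem.Dict Int (List Int)), s.keys.Nodup →
      a.update ((s.update e).items) = (a.update s.items).update e := by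
  induction e with
  | nil => intro a s _; rfl
  | cons p e' ih =>
    intro a s hs
    show a.update (((s.insert p.1 p.2).update e').items) = ((a.update s.items).insert p.1 p.2).update e'
    rw [ih a (s.insert p.1 p.2) (PySem.Dict.nodup_keys_insert _ _ _ hs)]
    congr 1
    obtain ⟨l⟩ := s
    exact pv_upd_insert l a p.1 p.2 hs

-- keys stay nodup through A's merging fold
theorem pv_nodup_foldl (f : Int → List (Int × List Int)) :
    ∀ (l : List Int) (s : PySem.Dict Int (List Int)), s.keys.Nodup →
      (List.foldl (fun s y => s.update (f y)) s l).keys.Nodup := by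
  intro l
  induction l with
  | nil => intro s hs; exact hs
  | cons y ys ih =>
    intro s hs
    exact ih _ (PySem.Dict.nodup_keys_update _ _ hs)

theorem pv_nodup_estraiFuel (n : Nat) (albero : PySem.Dict Int (List Int)) (y : Int) :
    (estraiFuel n albero y).keys.Nodup := by
  cases n with
  | zero => exact PySem.Dict.nodup_keys_empty
  | succ m =>
    rw [estraiFuel]
    cases albero.get? y with
    | none => exact PySem.Dict.nodup_keys_empty
    | some figli =>
      exact pv_nodup_foldl _ figli _
        (PySem.Dict.nodup_keys_insert _ _ _ PySem.Dict.nodup_keys_empty)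

-- the inner for-loop: B's sweep over the children equals A's fold of updates
theorem pv_inner (g : Int → PySem.Dict Int (List Int) → PySem.Dict Int (List Int))
    (h : Int → PySem.Dict Int (List Int))
    (hg : ∀ c a, g c a = a.update (h c).items) :
    ∀ (l : List Int) (acc s : PySem.Dict Int (List Int)), s.keys.Nodup →
      pvForEach g l (acc.update s.items) =
        acc.update ((List.foldl (fun s c => s.update (h c).items) s l).items) := by
  intro l
  induction l with
  | nil => intro acc s _; rfl
  | cons c l' ih =>
    intro acc s hs
    show pvForEach g l' (g c (acc.update s.items)) = _
    rw [hg c, ← pv_update_assoc _ acc s hs,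
        ih acc (s.update (h c).items) (PySem.Dict.nodup_keys_update _ _ hs)]
    rfl

-- main invariant: B's visita on accumulator acc is acc updated with A's subtree dict
theorem pv_main (n : Nat) : ∀ (albero : PySem.Dict Int (List Int)) (y : Int) (acc : PySem.Dict Int (List Int)),
    visitaFuel n albero y acc = acc.update (estraiFuel n albero y).items := by
  induction n with
  | zero => intro albero y acc; rfl
  | succ m ih =>
    intro albero y acc
    rw [visitaFuel, estraiFuel]
    cases albero.get? y with
    | none => rfl
    | some figli =>
      have hbase : acc.insert y figli
          = acc.update ((PySem.Dict.insert PySem.Dict.empty y figli).items) := by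
        have h : (PySem.Dict.insert PySem.Dict.empty y figli).items = [(y, figli)] := by
          rw [PySem.Dict.items_insert_of_not_contains _ _ (PySem.Dict.contains_empty _)]
          rfl
        rw [h]; rfl
      show pvForEach (visitaFuel m albero) figli (acc.insert y figli) = _
      rw [hbase]
      exact pv_inner (visitaFuel m albero) (estraiFuel m albero) (fun c a => ih albero c a)
        figli acc _ (PySem.Dict.nodup_keys_insert _ _ _ PySem.Dict.nodup_keys_empty)

theorem pv_empty_update (d : PySem.Dict Int (List Int)) (h : d.keys.Nodup) :
    PySem.Dict.empty.update d.items = d := by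
  apply PySem.Dict.ext
  show (List.foldl (fun acc p => acc.insert p.1 p.2) PySem.Dict.empty d.items).items = d.items
  have := PySem.Dict.items_foldl_insert_fresh (l := d.items) (k := Prod.fst) (v := Prod.snd)
      (d := PySem.Dict.empty) (fun a _ => PySem.Dict.contains_empty _) h
  simpa using this

-- ===== VERDICT (by name: the statement is the Claim_ definition above) =====
theorem estrai_sottoalbero_spec : Claim_equal_estrai_sottoalbero := by
  intro albero x _ _
  unfold Spec_estrai_sottoalbero estrai_sottoalbero estrai_sottoalbero_alt
  rw [pv_main, pv_empty_update _ (pv_nodup_estraiFuel _ _ _)]
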